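-- pv_equiv track=rewrite | github.com/BJCul/Pantasa | rules/hngram_sort.py | classify_ngram_pos
-- ===== SOURCE A (Python) =====
-- hierarchical_pos_tags = {
--     "NN.*": ["NNC", "NNP", "NNPA", "NNCA"],
--     "PR.*": ["PRS", "PRP", "PRSP", "PRO", "PRQ", "PRQP", "PRL", "PRC", "PRF", "PRI"],
--     "DT.*": ["DTC", "DTCP", "DTP", "DTPP"],
--     "CC.*": ["CCT", "CCR", "CCB", "CCA", "CCP", "CCU"],
--     "LM": [],
--     "TS": [],
--     "VB.*": ["VBW", "VBS", "VBH", "VBN", "VBTS", "VBTR", "VBTF", "VBTP", "VBAF", "VBOF", "VBOB", "VBOL", "VBOI", "VBRF"],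
--     "JJ.*": ["JJD", "JJC", "JJCC", "JJCS", "JJCN", "JJN"],
--     "RB.*": ["RBD", "RBN", "RBK", "RBP", "RBB", "RBR", "RBQ", "RBT", "RBF", "RBW", "RBM", "RBL", "RBI", "RBJ", "RBS"],
--     "CD.*": ["CDB"],
--     "FW": [],
--     "PM.*": ["PMP", "PME", "PMQ", "PMC", "PMSC", "PMS"]
-- }
--
-- def tag_type(tag):
--     # Check if the tag is a rough POS tag
--     if tag in hierarchical_pos_tags:
--         return "rough POS tag"
--     else:
--         return "detailed POS tag"
--
-- def classify_ngram_pos(pattern):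
--     pattern_parts = pattern.split()
--
--     # Separate patterns for rough POS, detailed POS, and words
--     rough_pos_pattern = []
--     detailed_pos_pattern = []
--
--     for part in pattern_parts:
--         tag_category = tag_type(part)
--
--         # Rough POS Pattern
--         if tag_category == "rough POS tag":
--             rough_pos_pattern.append(part)  # Keep rough POS tag
--             detailed_pos_pattern.append(r'.*')  # Replace detailed POS with wildcard
--         # Detailed POS Pattern
--         elif tag_category == "detailed POS tag":
--             rough_pos_pattern.append(r'.*')  # Replace rough POS with wildcard
--             detailed_pos_pattern.append(part)  # Keep detailed POS tag
--
--     # If Rough POS is filled only with ".*", it's considered Only Detailed POS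
--     if all(tag == '.*' for tag in rough_pos_pattern):
--         return 'Only Detailed POS'
--     # If Detailed POS is filled only with ".*", it's considered Only Rough POS
--     elif all(tag == '.*' for tag in detailed_pos_pattern):
--         return 'Only Rough POS'
--     # Otherwise, it's Mixed POS
--     else:
--         return 'Mixed POS'
-- ===== SOURCE B (Python) =====
-- hierarchical_pos_tags = {
--     "NN.*": ["NNC", "NNP", "NNPA", "NNCA"],
--     "PR.*": ["PRS", "PRP", "PRSP", "PRO", "PRQ", "PRQP", "PRL", "PRC", "PRF", "PRI"],
--     "DT.*": ["DTC", "DTCP", "DTP", "DTPP"],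
--     "CC.*": ["CCT", "CCR", "CCB", "CCA", "CCP", "CCU"],
--     "LM": [],
--     "TS": [],
--     "VB.*": ["VBW", "VBS", "VBH", "VBN", "VBTS", "VBTR", "VBTF", "VBTP", "VBAF", "VBOF", "VBOB", "VBOL", "VBOI", "VBRF"],
--     "JJ.*": ["JJD", "JJC", "JJCC", "JJCS", "JJCN", "JJN"],
--     "RB.*": ["RBD", "RBN", "RBK", "RBP", "RBB", "RBR", "RBQ", "RBT", "RBF", "RBW", "RBM", "RBL", "RBI", "RBJ", "RBS"],
--     "CD.*": ["CDB"],
--     "FW": [],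
--     "PM.*": ["PMP", "PME", "PMQ", "PMC", "PMSC", "PMS"]
-- }
--
-- ROUGH_KEYS = frozenset(hierarchical_pos_tags)
-- _TABLE = ['Only Detailed POS', 'Only Detailed POS', 'Only Rough POS', 'Mixed POS']
--
-- def classify_ngram_pos(pattern):
--     # Set algebra instead of a per-token loop: deduplicate the tokens, split
--     # them by set intersection/difference against the rough-tag key set, and
--     # index a 4-entry answer table by the two emptiness bits.
--     tokens = set(pattern.split())
--     rough = tokens & ROUGH_KEYS
--     detailed = tokens - ROUGH_KEYS - {'.*'}
--     return _TABLE[2 * bool(rough) + bool(detailed)]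
-- ===== Notes on version B (the rewrite author's own statement) =====
-- stated objective: alternative
-- what changed: Replaces the per-token loop building two parallel wildcard lists plus two all() scans with whole-collection set algebra (deduplicated token set intersected with / subtracted from the key set) and a 4-entry table indexed by the two emptiness bits, with no explicit loop or branch chain.
import Mathlib
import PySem

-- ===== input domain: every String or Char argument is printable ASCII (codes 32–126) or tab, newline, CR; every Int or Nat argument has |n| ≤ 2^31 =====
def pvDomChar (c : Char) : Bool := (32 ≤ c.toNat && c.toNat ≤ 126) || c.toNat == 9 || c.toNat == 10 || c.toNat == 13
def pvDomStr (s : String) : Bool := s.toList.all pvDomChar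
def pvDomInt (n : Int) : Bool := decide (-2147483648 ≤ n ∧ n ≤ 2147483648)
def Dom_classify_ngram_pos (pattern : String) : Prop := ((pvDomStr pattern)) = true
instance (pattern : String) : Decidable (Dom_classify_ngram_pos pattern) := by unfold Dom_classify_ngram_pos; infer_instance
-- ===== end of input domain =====

-- B replaces A's per-token loop (two parallel wildcard lists + two all() scans) by
-- set algebra on the deduplicated token set and a 4-entry table lookup (alternative).

-- ===== PORT A =====
def hierarchical_pos_tags : PySem.Dict String (List String) := PySem.Dict.ofList [
  ("NN.*", ["NNC", "NNP", "NNPA", "NNCA"]),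
  ("PR.*", ["PRS", "PRP", "PRSP", "PRO", "PRQ", "PRQP", "PRL", "PRC", "PRF", "PRI"]),
  ("DT.*", ["DTC", "DTCP", "DTP", "DTPP"]),
  ("CC.*", ["CCT", "CCR", "CCB", "CCA", "CCP", "CCU"]),
  ("LM", []),
  ("TS", []),
  ("VB.*", ["VBW", "VBS", "VBH", "VBN", "VBTS", "VBTR", "VBTF", "VBTP", "VBAF", "VBOF", "VBOB", "VBOL", "VBOI", "VBRF"]),
  ("JJ.*", ["JJD", "JJC", "JJCC", "JJCS", "JJCN", "JJN"]),
  ("RB.*", ["RBD", "RBN", "RBK", "RBP", "RBB", "RBR", "RBQ", "RBT", "RBF", "RBW", "RBM", "RBL", "RBI", "RBJ", "RBS"]),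
  ("CD.*", ["CDB"]),
  ("FW", []),
  ("PM.*", ["PMP", "PME", "PMQ", "PMC", "PMSC", "PMS"])]

def tag_type (tag : String) : String :=
  if hierarchical_pos_tags.contains tag then "rough POS tag" else "detailed POS tag"

-- loop body of A: accumulate (rough_pos_pattern, detailed_pos_pattern)
def pvStepA (st : List String × List String) (part : String) : List String × List String :=
  let tag_category := tag_type part
  if tag_category == "rough POS tag" then (st.1 ++ [part], st.2 ++ [".*"])
  else if tag_category == "detailed POS tag" then (st.1 ++ [".*"], st.2 ++ [part])
  else st

def classify_ngram_pos (pattern : String) : String :=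
  let pattern_parts := PySem.Str.split₀ pattern
  let acc := pattern_parts.foldl pvStepA ([], [])
  if acc.1.all (fun tag => tag == ".*") then "Only Detailed POS"
  else if acc.2.all (fun tag => tag == ".*") then "Only Rough POS"
  else "Mixed POS"

-- ===== PORT B =====
def ROUGH_KEYS : PySem.Set String := PySem.Set.ofList
  ["NN.*", "PR.*", "DT.*", "CC.*", "LM", "TS", "VB.*", "JJ.*", "RB.*", "CD.*", "FW", "PM.*"]

def pvTABLE : List String := ["Only Detailed POS", "Only Detailed POS", "Only Rough POS", "Mixed POS"]

def classify_ngram_pos_alt (pattern : String) : String :=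
  let tokens := PySem.Set.ofList (PySem.Str.split₀ pattern)
  let rough := PySem.Set.inter tokens ROUGH_KEYS
  let detailed := PySem.Set.diff (PySem.Set.diff tokens ROUGH_KEYS) [".*"]
  PySem.List.pyGetD pvTABLE
    (2 * (if rough.isEmpty then (0 : Int) else 1) + (if detailed.isEmpty then (0 : Int) else 1)) ""

-- ===== PRECONDITION & SPEC =====
def Spec_classify_ngram_pos (pattern : String) (out : String) : Prop := out = classify_ngram_pos_alt pattern
instance (pattern : String) (out : String) : Decidable (Spec_classify_ngram_pos pattern out) := by unfold Spec_classify_ngram_pos; infer_instance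

-- ===== CLAIM =====
def Claim_equal_classify_ngram_pos : Prop := ∀ (pattern : String), Dom_classify_ngram_pos pattern → Spec_classify_ngram_pos pattern (classify_ngram_pos pattern)

-- ===== LEMMAS AND PROOFS =====

-- A's dict membership coincides with B's key set membership (same 12 keys)
lemma contains_eq (p : String) :
    hierarchical_pos_tags.contains p = ROUGH_KEYS.contains p := by
  have hk : hierarchical_pos_tags.keys = ROUGH_KEYS := by decide
  rw [PySem.Dict.contains_eq_decide_mem_keys, hk]
  by_cases h : p ∈ ROUGH_KEYS
  · simp [h]
  · simp [h]

-- A's "rough list is all wildcards" = no token is a rough key;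
-- A's "detailed list is all wildcards" = every token is a rough key or '.*'
lemma pv_foldA (parts : List String) (r d : List String) :
    ((parts.foldl pvStepA (r, d)).1.all (fun t => t == ".*")
        = (r.all (fun t => t == ".*") && !(parts.any (fun p => ROUGH_KEYS.contains p))))
    ∧ ((parts.foldl pvStepA (r, d)).2.all (fun t => t == ".*")
        = (d.all (fun t => t == ".*") && !(parts.any (fun p => !ROUGH_KEYS.contains p && p != ".*")))) := by
  induction parts generalizing r d with
  | nil => simp
  | cons p ps ih =>
    simp only [List.foldl_cons, List.any_cons]
    by_cases hm : p ∈ ROUGH_KEYS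
    · have hc : ROUGH_KEYS.contains p = true := (PySem.Set.contains_iff ROUGH_KEYS p).mpr hm
      have hA : pvStepA (r, d) p = (r ++ [p], d ++ [".*"]) := by
        simp [pvStepA, tag_type, contains_eq, hm]
      rw [hA]
      obtain ⟨h1, h2⟩ := ih (r ++ [p]) (d ++ [".*"])
      have hpd : p ≠ ".*" := by
        intro hx; subst hx; exact absurd hm (by decide)
      constructor
      · rw [h1]; simp [hm, hpd]
      · rw [h2]; simp [hm]
    · have hc : ROUGH_KEYS.contains p = false := by
        cases hx : ROUGH_KEYS.contains p
        · rfl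
        · exact absurd ((PySem.Set.contains_iff ROUGH_KEYS p).mp hx) hm
      have hA : pvStepA (r, d) p = (r ++ [".*"], d ++ [p]) := by
        simp [pvStepA, tag_type, contains_eq, hm]
      rw [hA]
      obtain ⟨h1, h2⟩ := ih (r ++ [".*"]) (d ++ [p])
      constructor
      · rw [h1]; simp [hm]
      · rw [h2]
        by_cases hp : p = ".*"
        · subst hp; simp [hm]
        · simp [hm, bne, beq_eq_false_iff_ne.mpr hp]

-- B's intersection is empty iff no token is a rough key
lemma pv_rough_empty (parts : List String) :
    (PySem.Set.inter (PySem.Set.ofList parts) ROUGH_KEYS).isEmpty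
      = !(parts.any (fun p => ROUGH_KEYS.contains p)) := by
  cases h : parts.any (fun p => ROUGH_KEYS.contains p) with
  | true =>
    obtain ⟨p, hp, hc⟩ := List.any_eq_true.mp h
    have hmem : p ∈ PySem.Set.inter (PySem.Set.ofList parts) ROUGH_KEYS := by
      rw [PySem.Set.mem_inter, PySem.Set.mem_ofList]
      exact ⟨hp, (PySem.Set.contains_iff ROUGH_KEYS p).mp hc⟩
    simp only [Bool.not_true]
    rw [List.isEmpty_eq_false_iff_exists_mem]
    exact ⟨p, hmem⟩
  | false =>
    simp only [Bool.not_false]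
    rw [List.isEmpty_iff, List.eq_nil_iff_forall_not_mem]
    intro p hp
    rw [PySem.Set.mem_inter, PySem.Set.mem_ofList] at hp
    have hf := List.any_eq_false.mp h p hp.1
    exact hf ((PySem.Set.contains_iff ROUGH_KEYS p).mpr hp.2)

-- B's double difference is empty iff every token is a rough key or '.*'
lemma pv_detailed_empty (parts : List String) :
    (PySem.Set.diff (PySem.Set.diff (PySem.Set.ofList parts) ROUGH_KEYS) [".*"]).isEmpty
      = !(parts.any (fun p => !ROUGH_KEYS.contains p && p != ".*")) := by
  cases h : parts.any (fun p => !ROUGH_KEYS.contains p && p != ".*") with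
  | true =>
    obtain ⟨p, hp, hc⟩ := List.any_eq_true.mp h
    simp at hc
    have hmem : p ∈ PySem.Set.diff (PySem.Set.diff (PySem.Set.ofList parts) ROUGH_KEYS) [".*"] := by
      rw [PySem.Set.mem_diff, PySem.Set.mem_diff, PySem.Set.mem_ofList]
      exact ⟨⟨hp, hc.1⟩, by simpa using hc.2⟩
    simp only [Bool.not_true]
    rw [List.isEmpty_eq_false_iff_exists_mem]
    exact ⟨p, hmem⟩
  | false =>
    simp only [Bool.not_false]
    rw [List.isEmpty_iff, List.eq_nil_iff_forall_not_mem]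
    intro p hp
    rw [PySem.Set.mem_diff, PySem.Set.mem_diff, PySem.Set.mem_ofList] at hp
    have hf := List.any_eq_false.mp h p hp.1.1
    have hne : p ≠ ".*" := by simpa using hp.2
    simp [hne] at hf
    exact hp.1.2 hf

-- ===== VERDICT =====
theorem classify_ngram_pos_spec : Claim_equal_classify_ngram_pos := by
  intro pattern _
  unfold Spec_classify_ngram_pos classify_ngram_pos classify_ngram_pos_alt
  dsimp only
  obtain ⟨h1, h2⟩ := pv_foldA (PySem.Str.split₀ pattern) [] []
  simp only [List.all_nil, Bool.true_and] at h1 h2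
  rw [h1, h2, pv_rough_empty, pv_detailed_empty]
  cases hb1 : (PySem.Str.split₀ pattern).any (fun p => ROUGH_KEYS.contains p) <;>
  cases hb2 : (PySem.Str.split₀ pattern).any (fun p => !ROUGH_KEYS.contains p && p != ".*") <;>
  simp [pvTABLE, PySem.List.pyGetD]
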